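-- pv_equiv track=rewrite | github.com/khazhyk/dango.py | dango/utils.py | clean_triple_backtick
-- ===== SOURCE A (Python) =====
-- def clean_triple_backtick(line):
--     """Clean string for insertion in triple backtick code section."""
--     if not line:
--         return line
--
--     i = 0
--     n = 0
--     while i < len(line):
--         if (line[i]) == '`':
--             n += 1
--         if n == 3:
--             line = line[:i] + '\u200b' + line[i:]
--             n = 1
--             i += 1
--         i += 1
--
--     if line[-1] == '`':
--         line += '\u200b'
--
--     return line
-- ===== SOURCE B (Python) =====
-- def clean_triple_backtick(line):
--     """Clean string for insertion in triple backtick code section."""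
--     ticks = [i for i, c in enumerate(line) if c == '`']
--     marked = {t for p, t in enumerate(ticks) if p >= 2 and p % 2 == 0}
--     out = []
--     for i, c in enumerate(line):
--         if i in marked:
--             out.append('\u200b')
--         out.append(c)
--     if line.endswith('`'):
--         out.append('\u200b')
--     return ''.join(out)
-- ===== Notes on version B (the rewrite author's own statement) =====
-- stated objective: alternative
-- what changed: Replaces A's single pass that splices ZWSPs into the string it is iterating over with a running counter by two separate passes: build the table of backtick indices, mark every second one from the third on, then emit the output in one sweep plus an endswith check.
import Mathlib
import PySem

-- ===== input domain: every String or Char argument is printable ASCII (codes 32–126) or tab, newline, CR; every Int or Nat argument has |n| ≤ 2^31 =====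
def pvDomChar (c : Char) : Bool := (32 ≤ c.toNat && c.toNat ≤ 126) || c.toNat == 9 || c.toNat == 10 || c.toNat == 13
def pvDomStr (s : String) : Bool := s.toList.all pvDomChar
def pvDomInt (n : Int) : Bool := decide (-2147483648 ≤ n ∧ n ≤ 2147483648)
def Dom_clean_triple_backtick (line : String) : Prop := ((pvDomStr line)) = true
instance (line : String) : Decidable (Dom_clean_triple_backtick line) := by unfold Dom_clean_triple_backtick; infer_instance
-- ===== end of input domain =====

-- B replaces A's single-pass counter with in-place string splicing by a backtick index
-- table plus an every-other-index stride (objective: alternative decomposition, same cost).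

-- ===== PORT A =====
-- A's while loop: i scans the (growing) string, n counts backticks; when n reaches 3 a
-- ZWSP is spliced in before position i and i skips past it.
def pvLoopA (cs : List Char) (i n : Nat) : List Char :=
  if h : i < cs.length then
    if (if cs[i] = '`' then n + 1 else n) = 3 then
      pvLoopA (cs.take i ++ '\u200B' :: cs.drop i) (i + 2) 1
    else pvLoopA cs (i + 1) (if cs[i] = '`' then n + 1 else n)
  else cs
termination_by cs.length - i
decreasing_by
  · simp; omega
  · omega

def clean_triple_backtick (line : String) : String :=
  if line.toList = [] then line
  else
    let r := pvLoopA line.toList 0 0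
    -- line[-1]: r is nonempty here, so Python's line[-1] is r.getLast?
    let r := if r.getLast? = some '`' then r ++ ['\u200B'] else r
    String.ofList r

-- ===== PORT B =====
-- ticks = [i for i, c in enumerate(line) if c == '`']
def pvTicksB (j : Nat) : List Char → List Nat
  | [] => []
  | c :: t => if c = '`' then j :: pvTicksB (j + 1) t else pvTicksB (j + 1) t

-- {t for p, t in enumerate(ticks) if p >= 2 and p % 2 == 0}  (the list the set is built from)
def pvSelB (p : Nat) : List Nat → List Nat
  | [] => []
  | x :: ts => if 2 ≤ p ∧ p % 2 = 0 then x :: pvSelB (p + 1) ts else pvSelB (p + 1) ts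

-- the output loop: for i, c in enumerate(line): if i in marked: out.append ZWSP; out.append c
def pvBuildB (marked : PySem.Set Nat) (j : Nat) (acc : List Char) : List Char → List Char
  | [] => acc
  | c :: t => pvBuildB marked (j + 1) (acc ++ if PySem.Set.contains marked j then ['\u200B', c] else [c]) t

def clean_triple_backtick_alt (line : String) : String :=
  let cs := line.toList
  let marked : PySem.Set Nat := PySem.Set.ofList (pvSelB 0 (pvTicksB 0 cs))
  let out := pvBuildB marked 0 [] cs
  let out := if PySem.Chars.endswith cs ['`'] then out ++ ['\u200B'] else out
  String.ofList out

-- ===== PRECONDITION & SPEC =====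
def Spec_clean_triple_backtick (line : String) (out : String) : Prop := out = clean_triple_backtick_alt line
instance (line : String) (out : String) : Decidable (Spec_clean_triple_backtick line out) := by unfold Spec_clean_triple_backtick; infer_instance

-- ===== CLAIM (what is proved, stated in full; the proofs are below) =====
def Claim_equal_clean_triple_backtick : Prop := ∀ (line : String), Dom_clean_triple_backtick line → Spec_clean_triple_backtick line (clean_triple_backtick line)

-- ===== LEMMAS AND PROOFS =====

-- Pure description of A's loop on the unprocessed suffix, with A's counter n.
def pvFA : List Char → Nat → List Char
  | [], _ => []
  | c :: t, n =>
    if (if c = '`' then n + 1 else n) = 3 then '\u200B' :: c :: pvFA t 1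
    else c :: pvFA t (if c = '`' then n + 1 else n)

-- Pure description of B's marking rule, with k = backticks seen so far.
def pvGB : List Char → Nat → List Char
  | [], _ => []
  | c :: t, k =>
    if c = '`' then
      (if 2 ≤ k ∧ k % 2 = 0 then ['\u200B', c] else [c]) ++ pvGB t (k + 1)
    else c :: pvGB t k

-- A's counter as a function of the global number k of backticks already seen.
def pvN (k : Nat) : Nat := if k = 0 then 0 else if k % 2 = 1 then 1 else 2

theorem pvN_succ_eq_three_iff (k : Nat) : pvN k + 1 = 3 ↔ (2 ≤ k ∧ k % 2 = 0) := by
  unfold pvN; split_ifs <;> omega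

theorem pvN_succ (k : Nat) (h : ¬(2 ≤ k ∧ k % 2 = 0)) : pvN (k + 1) = pvN k + 1 := by
  unfold pvN; split_ifs <;> omega

theorem pvN_reset (k : Nat) (h : 2 ≤ k ∧ k % 2 = 0) : pvN (k + 1) = 1 := by
  unfold pvN; split_ifs <;> omega

theorem pvLoopA_eq (cs : List Char) (i n : Nat) :
    pvLoopA cs i n = cs.take i ++ pvFA (cs.drop i) n := by
  induction cs, i, n using pvLoopA.induct with
  | case1 cs i n h hn2 ih =>
    simp only [dite_eq_ite] at hn2
    have hlt : i ≤ cs.length := Nat.le_of_lt h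
    have e1 : (cs.take i ++ '\u200B' :: cs.drop i).take (i + 2)
        = cs.take i ++ '\u200B' :: [cs[i]] := by
      rw [List.take_append]
      congr 1
      · rw [List.take_take, Nat.min_eq_right (by omega)]
      · have hl : (cs.take i).length = i := by simp [List.length_take, Nat.min_eq_left hlt]
        rw [hl, show i + 2 - i = 2 from by omega]
        rw [List.drop_eq_getElem_cons h]
        rfl
    have e2 : (cs.take i ++ '\u200B' :: cs.drop i).drop (i + 2) = cs.drop (i + 1) := by
      rw [List.drop_append]
      have hl : (cs.take i).length = i := by simp [List.length_take, Nat.min_eq_left hlt]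
      have h1 : (cs.take i).drop (i + 2) = [] := by
        apply List.drop_eq_nil_of_le; omega
      rw [h1, hl, show i + 2 - i = 2 from by omega]
      simp [List.drop_drop]
    rw [pvLoopA, dif_pos h, if_pos hn2, ih, e1, e2]
    rw [List.drop_eq_getElem_cons h, pvFA, if_pos hn2]
    simp
  | case2 cs i n h hn2 ih =>
    simp only [dite_eq_ite] at hn2 ih
    rw [pvLoopA, dif_pos h, if_neg hn2, ih]
    rw [List.drop_eq_getElem_cons h, pvFA, if_neg hn2]
    rw [List.take_add_one, List.getElem?_eq_getElem h]
    simp only [Option.toList_some, List.append_assoc, List.singleton_append]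
  | case3 cs i n h =>
    have hle : cs.length ≤ i := Nat.le_of_not_lt h
    rw [pvLoopA, dif_neg h]
    simp [List.take_of_length_le hle, List.drop_of_length_le hle, pvFA]

theorem pvFA_eq_pvGB (t : List Char) (k : Nat) : pvFA t (pvN k) = pvGB t k := by
  induction t generalizing k with
  | nil => rfl
  | cons c t ih =>
    rw [pvFA, pvGB]
    by_cases hc : c = '`'
    · rw [if_pos hc, if_pos hc]
      by_cases h3 : 2 ≤ k ∧ k % 2 = 0
      · rw [if_pos ((pvN_succ_eq_three_iff k).mpr h3), if_pos h3]
        have h1 : pvFA t 1 = pvGB t (k + 1) := by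
          conv_lhs => rw [show (1 : Nat) = pvN (k + 1) from (pvN_reset k h3).symm]
          exact ih (k + 1)
        rw [h1]
        rfl
      · rw [if_neg (fun hh => h3 ((pvN_succ_eq_three_iff k).mp hh)), if_neg h3]
        have h1 : pvFA t (pvN k + 1) = pvGB t (k + 1) := by
          conv_lhs => rw [show pvN k + 1 = pvN (k + 1) from (pvN_succ k h3).symm]
          exact ih (k + 1)
        rw [h1]
        rfl
    · rw [if_neg hc, if_neg hc]
      have h3 : pvN k ≠ 3 := by unfold pvN; split_ifs <;> omega
      rw [if_neg h3, ih]

theorem pvFA_ne_nil (t : List Char) (n : Nat) (h : t ≠ []) : pvFA t n ≠ [] := by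
  cases t with
  | nil => exact absurd rfl h
  | cons c t => rw [pvFA]; split <;> (try split) <;> simp

theorem pvGetLast_cons_ne (c : Char) (l : List Char) (h : l ≠ []) :
    (c :: l).getLast? = l.getLast? := by
  cases l with
  | nil => exact absurd rfl h
  | cons a l => rw [List.getLast?_cons_cons]

theorem pvFA_getLast? (t : List Char) (n : Nat) : (pvFA t n).getLast? = t.getLast? := by
  induction t generalizing n with
  | nil => rfl
  | cons c t ih =>
    cases t with
    | nil =>
      rw [pvFA]
      split <;> (try split) <;> simp [pvFA]
    | cons c' t' =>
      rw [pvFA]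
      by_cases h3 : (if c = '`' then n + 1 else n) = 3
      · rw [if_pos h3, pvGetLast_cons_ne c (c' :: t') (by simp),
            pvGetLast_cons_ne '\u200B' (c :: pvFA (c' :: t') 1) (by simp),
            pvGetLast_cons_ne c (pvFA (c' :: t') 1) (pvFA_ne_nil (c' :: t') 1 (by simp))]
        exact ih 1
      · rw [if_neg h3, pvGetLast_cons_ne c (c' :: t') (by simp),
            pvGetLast_cons_ne c (pvFA (c' :: t') (if c = '`' then n + 1 else n))
              (pvFA_ne_nil (c' :: t') (if c = '`' then n + 1 else n) (by simp))]
        exact ih (if c = '`' then n + 1 else n)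

theorem pvTicksB_append (xs ys : List Char) (j : Nat) :
    pvTicksB j (xs ++ ys) = pvTicksB j xs ++ pvTicksB (j + xs.length) ys := by
  induction xs generalizing j with
  | nil => simp [pvTicksB]
  | cons c t ih =>
    simp only [List.cons_append, pvTicksB, List.length_cons]
    split <;> rw [ih, show j + 1 + t.length = j + (t.length + 1) from by omega] <;> simp

theorem mem_pvTicksB {m j : Nat} {t : List Char} (h : m ∈ pvTicksB j t) :
    j ≤ m ∧ m < j + t.length := by
  induction t generalizing j with
  | nil => simp [pvTicksB] at h
  | cons c t ih =>
    rw [pvTicksB] at h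
    split at h
    · rcases List.mem_cons.mp h with h' | h'
      · subst h'; simp
      · have := ih h'; simp only [List.length_cons]; omega
    · have := ih h; simp only [List.length_cons]; omega

theorem mem_pvSelB {m p : Nat} {ts : List Nat} :
    m ∈ pvSelB p ts ↔ ∃ q, ts[q]? = some m ∧ 2 ≤ p + q ∧ (p + q) % 2 = 0 := by
  induction ts generalizing p with
  | nil => simp [pvSelB]
  | cons x ts ih =>
    rw [pvSelB]
    constructor
    · intro h
      split at h
      · rcases List.mem_cons.mp h with h' | h'
        · exact ⟨0, by simp [h'], by omega, by omega⟩
        · obtain ⟨q, hq, h2, he⟩ := ih.mp h'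
          exact ⟨q + 1, by simpa using hq, by omega, by omega⟩
      · obtain ⟨q, hq, h2, he⟩ := ih.mp h
        exact ⟨q + 1, by simpa using hq, by omega, by omega⟩
    · rintro ⟨q, hq, h2, he⟩
      cases q with
      | zero =>
        simp only [List.getElem?_cons_zero, Option.some.injEq] at hq
        rw [if_pos (by omega)]
        exact List.mem_cons.mpr (Or.inl hq.symm)
      | succ q =>
        have hm : m ∈ pvSelB (p + 1) ts := ih.mpr ⟨q, by simpa using hq, by omega, by omega⟩
        split
        · exact List.mem_cons_of_mem _ hm
        · exact hm

theorem pvMarked_iff (pre : List Char) (c : Char) (t : List Char) :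
    pre.length ∈ pvSelB 0 (pvTicksB 0 (pre ++ c :: t)) ↔
      (c = '`' ∧ 2 ≤ (pvTicksB 0 pre).length ∧ (pvTicksB 0 pre).length % 2 = 0) := by
  have hsplit : pvTicksB 0 (pre ++ c :: t) = pvTicksB 0 pre ++ pvTicksB pre.length (c :: t) := by
    simpa using pvTicksB_append pre (c :: t) 0
  rw [hsplit, mem_pvSelB]
  constructor
  · rintro ⟨q, hq, h2, he⟩
    simp only [Nat.zero_add] at h2 he
    by_cases hqk : q < (pvTicksB 0 pre).length
    · exfalso
      rw [List.getElem?_append_left hqk] at hq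
      have := mem_pvTicksB (List.mem_of_getElem? hq)
      omega
    · rw [List.getElem?_append_right (Nat.le_of_not_lt hqk)] at hq
      rw [pvTicksB] at hq
      by_cases hc : c = '`'
      · rw [if_pos hc] at hq
        by_cases hq0 : q - (pvTicksB 0 pre).length = 0
        · exact ⟨hc, by omega, by omega⟩
        · exfalso
          obtain ⟨q', hq'⟩ : ∃ q', q - (pvTicksB 0 pre).length = q' + 1 :=
            ⟨_, (Nat.succ_pred_eq_of_pos (Nat.pos_of_ne_zero hq0)).symm⟩
          rw [hq', List.getElem?_cons_succ] at hq
          have := mem_pvTicksB (List.mem_of_getElem? hq)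
          omega
      · exfalso
        rw [if_neg hc] at hq
        have := mem_pvTicksB (List.mem_of_getElem? hq)
        omega
  · rintro ⟨hc, h2, he⟩
    refine ⟨(pvTicksB 0 pre).length, ?_, by omega, by omega⟩
    rw [List.getElem?_append_right (Nat.le_refl _), Nat.sub_self, pvTicksB, if_pos hc,
      List.getElem?_cons_zero]

theorem pvBuildB_eq (cs : List Char) (t pre acc : List Char) (hcs : cs = pre ++ t) :
    pvBuildB (PySem.Set.ofList (pvSelB 0 (pvTicksB 0 cs))) pre.length acc t
      = acc ++ pvGB t (pvTicksB 0 pre).length := by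
  induction t generalizing pre acc with
  | nil => simp [pvBuildB, pvGB]
  | cons c t ih =>
    have hcond : PySem.Set.contains (PySem.Set.ofList (pvSelB 0 (pvTicksB 0 cs))) pre.length = true
        ↔ (c = '`' ∧ 2 ≤ (pvTicksB 0 pre).length ∧ (pvTicksB 0 pre).length % 2 = 0) := by
      rw [PySem.Set.contains_iff, PySem.Set.mem_ofList, hcs]
      exact pvMarked_iff pre c t
    have hticks : pvTicksB 0 (pre ++ [c]) = pvTicksB 0 pre ++ pvTicksB pre.length [c] := by
      simpa using pvTicksB_append pre [c] 0
    have hlen : (pre ++ [c]).length = pre.length + 1 := by simp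
    have hcs' : cs = (pre ++ [c]) ++ t := by rw [hcs]; simp
    by_cases hc : c = '`'
    · have hklen : (pvTicksB 0 (pre ++ [c])).length = (pvTicksB 0 pre).length + 1 := by
        rw [hticks, pvTicksB, if_pos hc]; simp [pvTicksB]
      by_cases h3 : 2 ≤ (pvTicksB 0 pre).length ∧ (pvTicksB 0 pre).length % 2 = 0
      · rw [pvBuildB, if_pos (hcond.mpr ⟨hc, h3.1, h3.2⟩)]
        have hih := ih (pre ++ [c]) (acc ++ ['\u200B', c]) hcs'
        rw [hlen, hklen] at hih
        rw [hih, pvGB, if_pos hc, if_pos h3]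
        simp
      · rw [pvBuildB, if_neg (fun hh => h3 ⟨(hcond.mp hh).2.1, (hcond.mp hh).2.2⟩)]
        have hih := ih (pre ++ [c]) (acc ++ [c]) hcs'
        rw [hlen, hklen] at hih
        rw [hih, pvGB, if_pos hc, if_neg h3]
        simp
    · have hklen : (pvTicksB 0 (pre ++ [c])).length = (pvTicksB 0 pre).length := by
        rw [hticks, pvTicksB, if_neg hc]; simp [pvTicksB]
      rw [pvBuildB, if_neg (fun hh => hc (hcond.mp hh).1)]
      have hih := ih (pre ++ [c]) (acc ++ [c]) hcs'
      rw [hlen, hklen] at hih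
      rw [hih, pvGB, if_neg hc]
      simp

theorem pvEndswith_last (cs : List Char) :
    (PySem.Chars.endswith cs ['`'] = true) ↔ cs.getLast? = some '`' := by
  rw [PySem.Chars.endswith_iff]
  constructor
  · rintro ⟨u, hu⟩
    subst hu
    simp [List.getLast?_append]
  · intro h
    have hne : cs ≠ [] := by intro h'; subst h'; simp at h
    have hg : cs.getLast hne = '`' := by
      have := List.getLast?_eq_some_getLast (l := cs) hne
      rw [this] at h
      exact Option.some.inj h
    exact ⟨cs.dropLast, by rw [← hg]; exact List.dropLast_append_getLast hne⟩

-- ===== VERDICT (by name: the statement is the Claim_ definition above) =====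
theorem clean_triple_backtick_spec : Claim_equal_clean_triple_backtick := by
  intro line _
  unfold Spec_clean_triple_backtick clean_triple_backtick clean_triple_backtick_alt
  dsimp only
  by_cases hnil : line.toList = []
  · rw [if_pos hnil, hnil]
    rw [show PySem.Chars.endswith ([] : List Char) ['`'] = false from by decide]
    simp only [Bool.false_eq_true, if_false]
    rw [pvBuildB]
    conv_lhs => rw [← String.ofList_toList (s := line)]
    rw [hnil]
  · rw [if_neg hnil]
    have hA : pvLoopA line.toList 0 0 = pvGB line.toList 0 := by
      rw [pvLoopA_eq]
      simp only [List.take_zero, List.drop_zero, List.nil_append]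
      exact pvFA_eq_pvGB line.toList 0
    have hB : pvBuildB (PySem.Set.ofList (pvSelB 0 (pvTicksB 0 line.toList))) 0 [] line.toList
        = pvGB line.toList 0 := by
      have := pvBuildB_eq line.toList line.toList [] [] rfl
      simpa [pvTicksB] using this
    have hlast : (pvGB line.toList 0).getLast? = line.toList.getLast? := by
      rw [← pvFA_eq_pvGB line.toList 0]
      exact pvFA_getLast? line.toList (pvN 0)
    rw [hA, hB]
    congr 1
    by_cases hend : line.toList.getLast? = some '`'
    · rw [if_pos (hlast.trans hend), if_pos ((pvEndswith_last _).mpr hend)]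
    · rw [if_neg (fun hh => hend (hlast ▸ hh)),
          if_neg (fun hh => hend ((pvEndswith_last _).mp hh))]
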